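-- pv_equiv track=rewrite | github.com/Linxinrong8023/grpo-gspo-dapo_reproduce | src/post_training_contrast/math_utils.py | _symbolic_text_too_complex
-- ===== SOURCE A (Python) =====
-- MAX_SYMBOLIC_INPUT_CHARS = 160
--
-- MAX_SYMBOLIC_TEXT_OPS = 32
--
-- def _symbolic_text_too_complex(text: str) -> bool:
--     """在调用 SymPy 前做轻量复杂度门控，避免坏样本拖死 reward。"""
--     if len(text) > MAX_SYMBOLIC_INPUT_CHARS:
--         return True
--     op_count = sum(text.count(op) for op in ("+", "-", "*", "/", "^", "=", "<", ">"))
--     if op_count > MAX_SYMBOLIC_TEXT_OPS: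
--         return True
--     grouping_count = sum(text.count(ch) for ch in ("(", ")", "{", "}", "[", "]"))
--     return grouping_count > MAX_SYMBOLIC_TEXT_OPS * 2
-- ===== SOURCE B (Python) =====
-- MAX_SYMBOLIC_INPUT_CHARS = 160
--
-- MAX_SYMBOLIC_TEXT_OPS = 32
--
-- _OPS = frozenset("+-*/^=<>")
-- _GROUPING = frozenset("(){}[]")
--
-- def _symbolic_text_too_complex(text: str) -> bool:
--     if len(text) > MAX_SYMBOLIC_INPUT_CHARS:
--         return True
--     op_count = 0
--     grouping_count = 0
--     for ch in text:
--         if ch in _OPS: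
--             op_count += 1
--         elif ch in _GROUPING:
--             grouping_count += 1
--     if op_count > MAX_SYMBOLIC_TEXT_OPS:
--         return True
--     return grouping_count > MAX_SYMBOLIC_TEXT_OPS * 2
-- ===== Notes on version B (the rewrite author's own statement) =====
-- stated objective: alternative
-- what changed: Replaces the 14 separate str.count scans (8 operators + 6 grouping chars) with a single pass over the text that keeps two running tallies via frozenset membership.
import Mathlib
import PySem

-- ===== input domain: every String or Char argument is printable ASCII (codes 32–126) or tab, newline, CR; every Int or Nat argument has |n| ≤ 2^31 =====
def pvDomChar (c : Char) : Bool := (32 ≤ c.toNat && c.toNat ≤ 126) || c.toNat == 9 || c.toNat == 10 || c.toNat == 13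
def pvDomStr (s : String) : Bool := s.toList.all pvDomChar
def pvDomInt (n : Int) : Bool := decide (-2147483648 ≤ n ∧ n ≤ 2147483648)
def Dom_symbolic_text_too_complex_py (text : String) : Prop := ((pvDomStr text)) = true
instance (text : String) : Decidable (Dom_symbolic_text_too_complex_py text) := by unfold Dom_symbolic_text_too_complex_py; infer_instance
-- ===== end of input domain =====

-- B replaces A's fourteen separate .count scans by a single pass keeping two tallies (objective: alternative single-pass decomposition).

-- ===== PORT A =====
-- literal port of A: length guard, then sum of per-substring counts for ops, then for grouping chars
def symbolic_text_too_complex_py (text : String) : Bool :=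
  if PySem.Str.len text > 160 then true
  else
    let op_count : Nat :=
      (["+", "-", "*", "/", "^", "=", "<", ">"].map (fun op => PySem.Str.count text op)).sum
    if op_count > 32 then true
    else
      let grouping_count : Nat :=
        (["(", ")", "{", "}", "[", "]"].map (fun ch => PySem.Str.count text ch)).sum
      grouping_count > 32 * 2

-- ===== PORT B =====
def pvOps : PySem.Set Char := PySem.Set.ofList ['+', '-', '*', '/', '^', '=', '<', '>']
def pvGrouping : PySem.Set Char := PySem.Set.ofList ['(', ')', '{', '}', '[', ']']

-- port of B: one fold over the characters accumulating (op_count, grouping_count)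
def symbolic_text_too_complex_py_alt (text : String) : Bool :=
  if PySem.Str.len text > 160 then true
  else
    let p : Nat × Nat := text.toList.foldl
      (fun (p : Nat × Nat) ch =>
        if pvOps.contains ch then (p.1 + 1, p.2)
        else if pvGrouping.contains ch then (p.1, p.2 + 1)
        else p) (0, 0)
    if p.1 > 32 then true
    else p.2 > 32 * 2

-- ===== PRECONDITION & SPEC =====
def Spec_symbolic_text_too_complex_py (text : String) (out : Bool) : Prop := out = symbolic_text_too_complex_py_alt text
instance (text : String) (out : Bool) : Decidable (Spec_symbolic_text_too_complex_py text out) := by unfold Spec_symbolic_text_too_complex_py; infer_instance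

-- ===== CLAIM (what is proved, stated in full; the proofs are below) =====
def Claim_equal_symbolic_text_too_complex_py : Prop := ∀ (text : String), Dom_symbolic_text_too_complex_py text → Spec_symbolic_text_too_complex_py text (symbolic_text_too_complex_py text)

-- ===== LEMMAS AND PROOFS =====

-- Chars.count with a single-character pattern is List.count of that character
theorem chars_count_go_singleton (c : Char) :
    ∀ (l : List Char) (fuel : Nat), l.length ≤ fuel → ∀ acc,
      PySem.Chars.count.go [c] fuel l acc = acc + l.count c := by
  intro l
  induction l with
  | nil =>
    intro fuel _ acc
    cases fuel <;> simp [PySem.Chars.count.go]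
  | cons h t ih =>
    intro fuel hf acc
    cases fuel with
    | zero => simp at hf
    | succ n =>
      simp only [List.length_cons, Nat.succ_le_succ_iff] at hf
      by_cases hc : c = h
      · subst hc
        simp [PySem.Chars.count.go, List.isPrefixOf, ih n hf]
        omega
      · have hp : ([c].isPrefixOf (h :: t)) = false := by
          simp [List.isPrefixOf]; intro h'; exact absurd h' hc
        have hne : ¬ (h = c) := fun h' => hc h'.symm
        simp [PySem.Chars.count.go, hp, ih n hf, hne]
theorem chars_count_singleton (l : List Char) (c : Char) :
    PySem.Chars.count l [c] = l.count c := by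
  have := chars_count_go_singleton c l l.length (Nat.le_refl _) 0
  simpa [PySem.Chars.count]

-- sum of per-character counts over a duplicate-free char list = countP of membership
theorem sum_map_count_cons (h : Char) (t : List Char) : ∀ os : List Char,
    (os.map (fun c => List.count c (h :: t))).sum
      = (os.map (fun c => List.count c t)).sum + List.count h os := by
  intro os
  induction os with
  | nil => simp
  | cons o os' iho =>
    simp only [List.map_cons, List.sum_cons]
    rw [iho, List.count_cons (a := o) (b := h) (l := t), List.count_cons (a := h) (b := o) (l := os')]
    by_cases ho : o = h
    · subst ho; simp; omega
    · have ho' : ¬ (h = o) := fun e => ho e.symm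
      simp [ho, ho']
      omega
theorem sum_counts_eq_countP (ops : List Char) (hnd : ops.Nodup) (l : List Char) :
    (ops.map (fun c => l.count c)).sum = l.countP (fun x => ops.contains x) := by
  induction l with
  | nil => simp
  | cons h t ih =>
    rw [sum_map_count_cons h t ops, ih, List.countP_cons]
    by_cases hm : h ∈ ops
    · rw [List.count_eq_one_of_mem hnd hm]
      simp [hm]
    · rw [List.count_eq_zero_of_not_mem hm]
      simp [hm]

theorem ops_not_grouping (c : Char) (h1 : pvOps.contains c = true) :
    pvGrouping.contains c = false := by
  have hm : c ∈ ['+', '-', '*', '/', '^', '=', '<', '>'] := by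
    simpa [pvOps, PySem.Set.mem_ofList] using h1
  fin_cases hm <;> decide
theorem fold_pair (l : List Char) :
    ∀ (a b : Nat),
      l.foldl (fun (p : Nat × Nat) ch =>
        if pvOps.contains ch then (p.1 + 1, p.2)
        else if pvGrouping.contains ch then (p.1, p.2 + 1)
        else p) (a, b)
      = (a + l.countP (fun x => pvOps.contains x),
         b + l.countP (fun x => pvGrouping.contains x)) := by
  induction l with
  | nil => intro a b; simp
  | cons h t ih =>
    intro a b
    simp only [List.foldl_cons, List.countP_cons]
    by_cases h1 : pvOps.contains h = true
    · have h2 := ops_not_grouping h h1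
      simp only [h1, h2]
      simp only [Bool.false_eq_true, reduceIte]
      rw [ih]
      simp only [Prod.mk.injEq]
      refine ⟨by omega, by omega⟩
    · simp only [Bool.not_eq_true] at h1
      by_cases h2 : pvGrouping.contains h = true
      · simp only [h1, h2]
        simp only [Bool.false_eq_true, reduceIte]
        rw [ih]
        simp only [Prod.mk.injEq]
        refine ⟨by omega, by omega⟩
      · simp only [Bool.not_eq_true] at h2
        simp only [h1, h2]
        simp only [Bool.false_eq_true, reduceIte]
        rw [ih]
        simp

-- ===== VERDICT (by name: the statement is the Claim_ definition above) =====
theorem symbolic_text_too_complex_py_spec : Claim_equal_symbolic_text_too_complex_py := by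
  intro text _
  unfold Spec_symbolic_text_too_complex_py
  unfold symbolic_text_too_complex_py symbolic_text_too_complex_py_alt
  rw [fold_pair text.toList 0 0]
  have hops := sum_counts_eq_countP ['+', '-', '*', '/', '^', '=', '<', '>'] (by decide) text.toList
  have hgrp := sum_counts_eq_countP ['(', ')', '{', '}', '[', ']'] (by decide) text.toList
  simp only [List.map_cons, List.map_nil, List.sum_cons, List.sum_nil, Nat.add_zero] at hops hgrp
  simp only [PySem.Str.count_eq, List.map_cons, List.map_nil, List.sum_cons, List.sum_nil,
    Nat.add_zero,
    show ("+" : String).toList = ['+'] from rfl, show ("-" : String).toList = ['-'] from rfl,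
    show ("*" : String).toList = ['*'] from rfl, show ("/" : String).toList = ['/'] from rfl,
    show ("^" : String).toList = ['^'] from rfl, show ("=" : String).toList = ['='] from rfl,
    show ("<" : String).toList = ['<'] from rfl, show (">" : String).toList = ['>'] from rfl,
    show ("(" : String).toList = ['('] from rfl, show (")" : String).toList = [')'] from rfl,
    show ("{" : String).toList = ['{'] from rfl, show ("}" : String).toList = ['}'] from rfl,
    show ("[" : String).toList = ['['] from rfl, show ("]" : String).toList = [']'] from rfl,
    chars_count_singleton, hops, hgrp]
  have e1 : (fun x => pvOps.contains x)
      = (fun x : Char => ['+', '-', '*', '/', '^', '=', '<', '>'].contains x) := by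
    funext x; simp [pvOps, PySem.Set.mem_ofList]
  have e2 : (fun x => pvGrouping.contains x)
      = (fun x : Char => ['(', ')', '{', '}', '[', ']'].contains x) := by
    funext x; simp [pvGrouping, PySem.Set.mem_ofList]
  simp only [e1, e2, Nat.zero_add]
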